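-- pv_equiv track=rewrite | github.com/ruaan-deysel/wattpilot-api | src/wattpilot_api/auth.py | _bcryptjs_encode_base64_string
-- ===== SOURCE A (Python) =====
-- _BASE64_CODE = list("./ABCDEFGHIJKLMNOPQRSTUVWXYZabcdefghijklmnopqrstuvwxyz0123456789")
--
-- def _bcryptjs_base64_encode(b: bytes, length: int) -> str:
--     """Port of bcrypt.js ``encodeBase64`` for compatibility with the Wattpilot firmware."""
--     if length <= 0 or length > len(b):
--         msg = f"Illegal len: {length}"
--         raise ValueError(msg)
--
--     off = 0
--     rs: list[str] = []
--     while off < length: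
--         c1 = b[off] & 0xFF
--         off += 1
--         rs.append(_BASE64_CODE[(c1 >> 2) & 0x3F])
--         c1 = (c1 & 0x03) << 4
--         if off >= length:
--             rs.append(_BASE64_CODE[c1 & 0x3F])
--             break
--
--         c2 = b[off] & 0xFF
--         off += 1
--         c1 |= (c2 >> 4) & 0x0F
--         rs.append(_BASE64_CODE[c1 & 0x3F])
--         c1 = (c2 & 0x0F) << 2
--         if off >= length:
--             rs.append(_BASE64_CODE[c1 & 0x3F])
--             break
--
--         c2 = b[off] & 0xFF
--         off += 1
--         c1 |= (c2 >> 6) & 0x03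
--         rs.append(_BASE64_CODE[c1 & 0x3F])
--         rs.append(_BASE64_CODE[c2 & 0x3F])
--
--     return "".join(rs)
--
-- def _bcryptjs_encode_base64_string(s: str, length: int) -> str:
--     """Encode a numeric-only serial string for bcrypt salt generation."""
--     if s.isdigit():
--         vals = [ord(ch) - ord("0") for ch in s]
--         b = bytes([0] * (length - len(vals)) + vals)
--     else:
--         msg = f"Serial must be digits only, got: {s}"
--         raise ValueError(msg)
--     return _bcryptjs_base64_encode(b, length)
-- ===== SOURCE B (Python) =====
-- _BASE64_CODE = "./ABCDEFGHIJKLMNOPQRSTUVWXYZabcdefghijklmnopqrstuvwxyz0123456789"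
--
--
-- def _bcryptjs_encode_base64_string(s: str, length: int) -> str:
--     """Encode a numeric-only serial string for bcrypt salt generation.
--
--     Chunked re-implementation: instead of a byte-by-byte state machine with
--     breaks, pack each 3-byte group into one 24-bit integer and emit its
--     leading sextets.
--     """
--     if not s.isdigit():
--         msg = f"Serial must be digits only, got: {s}"
--         raise ValueError(msg)
--     vals = [ord(ch) - ord("0") for ch in s]
--     b = [0] * (length - len(vals)) + vals
--     if length <= 0 or length > len(b):
--         msg = f"Illegal len: {length}"
--         raise ValueError(msg)
--     out: list[str] = []
--     for off in range(0, length, 3):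
--         n = min(3, length - off)
--         x = b[off] << 16
--         if n > 1:
--             x += b[off + 1] << 8
--         if n > 2:
--             x += b[off + 2]
--         sextets = [x >> 18, (x >> 12) & 63, (x >> 6) & 63, x & 63]
--         out.extend(_BASE64_CODE[v] for v in sextets[: n + 1])
--     return "".join(out)
-- ===== Notes on version B (the rewrite author's own statement) =====
-- stated objective: alternative
-- what changed: Replaced the bcrypt.js byte-by-byte state machine (carry variable c1 threaded across bytes, two mid-loop breaks) with a loop over 3-byte chunks that packs each chunk into one 24-bit integer and emits its first n+1 sextets; digit check, zero padding and ValueError guards are unchanged.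
import Mathlib
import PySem

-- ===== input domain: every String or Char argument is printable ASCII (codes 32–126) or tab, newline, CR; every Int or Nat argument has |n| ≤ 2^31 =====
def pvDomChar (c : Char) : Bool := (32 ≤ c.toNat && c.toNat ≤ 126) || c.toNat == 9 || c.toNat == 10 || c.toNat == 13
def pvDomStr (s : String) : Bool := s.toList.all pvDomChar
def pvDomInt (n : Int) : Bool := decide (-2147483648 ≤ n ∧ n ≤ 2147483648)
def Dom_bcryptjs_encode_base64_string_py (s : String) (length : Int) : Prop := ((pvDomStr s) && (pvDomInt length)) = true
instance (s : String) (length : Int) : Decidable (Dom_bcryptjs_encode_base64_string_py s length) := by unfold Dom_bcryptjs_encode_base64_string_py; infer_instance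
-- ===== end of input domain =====

-- B replaces A's byte-by-byte carry state machine (with mid-loop breaks) by a loop over
-- 3-byte chunks packed into one 24-bit integer; same output, same cost ("alternative").
-- Bit operations of both Pythons act on nonnegative ints < 2^24 and are ported exactly as
-- arithmetic: x >> k = x / 2^k, x & (2^k-1) = x % 2^k, x << k = x * 2^k, and `|=` on
-- disjoint bit ranges as `+` (exact there).

-- ===== PORT A =====
def pvB64 : List Char := "./ABCDEFGHIJKLMNOPQRSTUVWXYZabcdefghijklmnopqrstuvwxyz0123456789".toList

-- _BASE64_CODE[i] (Python indexes only with 0 ≤ i ≤ 63, always in range)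
def pvCode (i : Int) : Char := PySem.List.pyGetD pvB64 i '?'

-- the `while off < length` loop of _bcryptjs_base64_encode: one fuel unit per iteration
def pvEncA (b : List Int) (length : Int) : Nat → Int → List Char
  | 0, _ => []
  | fuel+1, off =>
    if off < length then
      let c1 := PySem.List.pyGetD b off 0 % 256            -- c1 = b[off] & 0xFF; off += 1
      let s1 := pvCode (c1 / 4 % 64)                       -- _BASE64_CODE[(c1 >> 2) & 0x3F]
      let t1 := c1 % 4 * 16                                -- c1 = (c1 & 0x03) << 4
      if length ≤ off + 1 then [s1, pvCode (t1 % 64)]      -- if off >= length: append; break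
      else
        let c2 := PySem.List.pyGetD b (off + 1) 0 % 256    -- c2 = b[off] & 0xFF; off += 1
        let s2 := pvCode ((t1 + c2 / 16 % 16) % 64)        -- c1 |= (c2 >> 4) & 0x0F; append
        let t2 := c2 % 16 * 4                              -- c1 = (c2 & 0x0F) << 2
        if length ≤ off + 2 then [s1, s2, pvCode (t2 % 64)]
        else
          let c3 := PySem.List.pyGetD b (off + 2) 0 % 256  -- c2 = b[off] & 0xFF; off += 1
          [s1, s2, pvCode ((t2 + c3 / 64 % 4) % 64), pvCode (c3 % 64)]
            ++ pvEncA b length fuel (off + 3)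
    else []

def bcryptjs_encode_base64_string_py (s : String) (length : Int) : String :=
  if PySem.Str.strIsdigit s then
    let vals := s.toList.map (fun ch => (ch.toNat : Int) - 48)   -- ord(ch) - ord('0')
    let b := List.replicate (length - (vals.length : Int)).toNat 0 ++ vals
    -- _bcryptjs_base64_encode(b, length):
    if length ≤ 0 ∨ (b.length : Int) < length then ""    -- Python raises ValueError (outside Pre_)
    else String.ofList (pvEncA b length length.toNat 0)  -- "".join(rs)
  else ""                                                -- Python raises ValueError (outside Pre_)

-- ===== PORT B =====
-- the `for off in range(0, length, 3)` loop of Source B: one fuel unit per chunk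
def pvEncB (b : List Int) (length : Int) : Nat → Int → List Char
  | 0, _ => []
  | fuel+1, off =>
    if off < length then
      let n := min 3 (length - off)
      let x0 := PySem.List.pyGetD b off 0 * 65536                       -- x = b[off] << 16
      let x1 := if 1 < n then x0 + PySem.List.pyGetD b (off + 1) 0 * 256 else x0
      let x := if 2 < n then x1 + PySem.List.pyGetD b (off + 2) 0 else x1
      let sextets := [x / 262144, x / 4096 % 64, x / 64 % 64, x % 64]   -- x>>18, (x>>12)&63, …
      (sextets.take (n.toNat + 1)).map pvCode ++ pvEncB b length fuel (off + 3)
    else []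

def bcryptjs_encode_base64_string_py_alt (s : String) (length : Int) : String :=
  if PySem.Str.strIsdigit s then
    let vals := s.toList.map (fun ch => (ch.toNat : Int) - 48)
    let b := List.replicate (length - (vals.length : Int)).toNat 0 ++ vals
    if length ≤ 0 ∨ (b.length : Int) < length then ""    -- Python raises ValueError (outside Pre_)
    else String.ofList (pvEncB b length length.toNat 0)
  else ""                                                -- Python raises ValueError (outside Pre_)

-- ===== PRECONDITION & SPEC =====
-- Python A raises ValueError exactly when s is not a nonempty all-digit string, or length ≤ 0;
-- Pre_ excludes exactly those inputs (length > len(b) can never fire after the zero-padding).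
def Pre_bcryptjs_encode_base64_string_py (s : String) (length : Int) : Prop :=
  PySem.Str.strIsdigit s = true ∧ 1 ≤ length
instance (s : String) (length : Int) : Decidable (Pre_bcryptjs_encode_base64_string_py s length) := by unfold Pre_bcryptjs_encode_base64_string_py; infer_instance

def pvWitness_bcryptjs_encode_base64_string_py : String × Int := ("00057", 5)

def Spec_bcryptjs_encode_base64_string_py (s : String) (length : Int) (out : String) : Prop := out = bcryptjs_encode_base64_string_py_alt s length
instance (s : String) (length : Int) (out : String) : Decidable (Spec_bcryptjs_encode_base64_string_py s length out) := by unfold Spec_bcryptjs_encode_base64_string_py; infer_instance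

-- ===== CLAIM (what is proved, stated in full; the proofs are below) =====
def Claim_equal_bcryptjs_encode_base64_string_py : Prop := ∀ (s : String) (length : Int), Dom_bcryptjs_encode_base64_string_py s length → Pre_bcryptjs_encode_base64_string_py s length → Spec_bcryptjs_encode_base64_string_py s length (bcryptjs_encode_base64_string_py s length)

-- ===== LEMMAS AND PROOFS =====

-- value read by either loop is a byte whenever the index is in range
lemma pvGetD_byte {b : List Int} (hb : ∀ x ∈ b, 0 ≤ x ∧ x < 256) (i : Int)
    (h0 : 0 ≤ i) (h1 : i < (b.length : Int)) :
    0 ≤ PySem.List.pyGetD b i 0 ∧ PySem.List.pyGetD b i 0 < 256 :=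
  hb _ (PySem.List.pyGetD_mem b 0 ⟨by omega, h1⟩)

lemma pvEncB_nil (b : List Int) (len : Int) (fuel : Nat) (off : Int) (h : ¬ off < len) :
    pvEncB b len fuel off = [] := by
  cases fuel with
  | zero => rfl
  | succ fuel => rw [pvEncB, if_neg h]

-- the two loops agree for EQUAL fuel: each consumes one unit per 3-byte chunk
lemma pvEnc_eq (b : List Int) (len : Int) (hb : ∀ x ∈ b, 0 ≤ x ∧ x < 256)
    (hlen : len ≤ (b.length : Int)) :
    ∀ (fuel : Nat) (off : Int), 0 ≤ off → pvEncA b len fuel off = pvEncB b len fuel off := by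
  intro fuel
  induction fuel with
  | zero => intro off _; rfl
  | succ fuel ih =>
    intro off hoff
    by_cases h1 : off < len
    · obtain ⟨hv1l, hv1u⟩ := pvGetD_byte hb off hoff (by omega)
      rw [pvEncA, pvEncB, if_pos h1, if_pos h1]
      by_cases h2 : len ≤ off + 1
      · have hn : min 3 (len - off) = 1 := by omega
        rw [if_pos h2]
        simp only [hn]
        rw [if_neg (show ¬ (1:Int) < 1 by omega), if_neg (show ¬ (2:Int) < 1 by omega),
          pvEncB_nil b len fuel (off + 3) (by omega)]
        simp only [Int.toNat_one, List.take_succ_cons, List.take_zero, List.map_cons,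
          List.map_nil, List.append_nil]
        rw [show PySem.List.pyGetD b off 0 % 256 / 4 % 64
              = PySem.List.pyGetD b off 0 * 65536 / 262144 by omega,
            show PySem.List.pyGetD b off 0 % 256 % 4 * 16 % 64
              = PySem.List.pyGetD b off 0 * 65536 / 4096 % 64 by omega]
      · obtain ⟨hv2l, hv2u⟩ := pvGetD_byte hb (off + 1) (by omega) (by omega)
        rw [if_neg h2]
        by_cases h3 : len ≤ off + 2
        · have hn : min 3 (len - off) = 2 := by omega
          rw [if_pos h3]
          simp only [hn]
          rw [if_pos (show (1:Int) < 2 by omega), if_neg (show ¬ (2:Int) < 2 by omega),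
            pvEncB_nil b len fuel (off + 3) (by omega),
            show ((2:Int)).toNat = 2 by decide]
          simp only [List.take_succ_cons, List.take_zero, List.map_cons, List.map_nil,
            List.append_nil]
          rw [show PySem.List.pyGetD b off 0 % 256 / 4 % 64
                = (PySem.List.pyGetD b off 0 * 65536 + PySem.List.pyGetD b (off + 1) 0 * 256)
                    / 262144 by omega,
              show (PySem.List.pyGetD b off 0 % 256 % 4 * 16
                      + PySem.List.pyGetD b (off + 1) 0 % 256 / 16 % 16) % 64
                = (PySem.List.pyGetD b off 0 * 65536 + PySem.List.pyGetD b (off + 1) 0 * 256)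
                    / 4096 % 64 by omega,
              show PySem.List.pyGetD b (off + 1) 0 % 256 % 16 * 4 % 64
                = (PySem.List.pyGetD b off 0 * 65536 + PySem.List.pyGetD b (off + 1) 0 * 256)
                    / 64 % 64 by omega]
        · obtain ⟨hv3l, hv3u⟩ := pvGetD_byte hb (off + 2) (by omega) (by omega)
          have hn : min 3 (len - off) = 3 := by omega
          rw [if_neg h3]
          simp only [hn]
          rw [if_pos (show (1:Int) < 3 by omega), if_pos (show (2:Int) < 3 by omega),
            show ((3:Int)).toNat = 3 by decide, ih (off + 3) (by omega)]
          simp only [List.take_succ_cons, List.take_zero, List.map_cons, List.map_nil,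
            List.cons_append, List.nil_append]
          rw [show PySem.List.pyGetD b off 0 % 256 / 4 % 64
                = (PySem.List.pyGetD b off 0 * 65536 + PySem.List.pyGetD b (off + 1) 0 * 256
                    + PySem.List.pyGetD b (off + 2) 0) / 262144 by omega,
              show (PySem.List.pyGetD b off 0 % 256 % 4 * 16
                      + PySem.List.pyGetD b (off + 1) 0 % 256 / 16 % 16) % 64
                = (PySem.List.pyGetD b off 0 * 65536 + PySem.List.pyGetD b (off + 1) 0 * 256
                    + PySem.List.pyGetD b (off + 2) 0) / 4096 % 64 by omega,
              show (PySem.List.pyGetD b (off + 1) 0 % 256 % 16 * 4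
                      + PySem.List.pyGetD b (off + 2) 0 % 256 / 64 % 4) % 64
                = (PySem.List.pyGetD b off 0 * 65536 + PySem.List.pyGetD b (off + 1) 0 * 256
                    + PySem.List.pyGetD b (off + 2) 0) / 64 % 64 by omega,
              show PySem.List.pyGetD b (off + 2) 0 % 256 % 64
                = (PySem.List.pyGetD b off 0 * 65536 + PySem.List.pyGetD b (off + 1) 0 * 256
                    + PySem.List.pyGetD b (off + 2) 0) % 64 by omega]
    · rw [pvEncA, pvEncB, if_neg h1, if_neg h1]

-- digits of an all-digit string give bytes 0..9 after the ord-48 map, zero-padding included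
lemma pvBytes_byte (s : String) (hd : PySem.Str.strIsdigit s = true) (pad : Nat) :
    ∀ x ∈ List.replicate pad (0 : Int) ++ s.toList.map (fun ch => (ch.toNat : Int) - 48),
      0 ≤ x ∧ x < 256 := by
  intro x hx
  rcases List.mem_append.1 hx with h | h
  · have := List.eq_of_mem_replicate h; omega
  · obtain ⟨c, hc, rfl⟩ := List.mem_map.1 h
    rw [PySem.Str.strIsdigit_eq, PySem.Chars.strIsdigit] at hd
    have hcdig := (List.all_eq_true.1 (Bool.and_elim_right hd)) c hc
    rw [PySem.Chars.isdigit] at hcdig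
    have h0 : '0' ≤ c := by simpa using Bool.and_elim_left hcdig
    have h9 : c ≤ '9' := by simpa using Bool.and_elim_right hcdig
    rw [Char.le_def] at h0 h9
    have h0' : 48 ≤ c.toNat := h0
    have h9' : c.toNat ≤ 57 := h9
    omega

-- ===== VERDICT (by name: the statement is the Claim_ definition above) =====
theorem bcryptjs_encode_base64_string_py_spec : Claim_equal_bcryptjs_encode_base64_string_py := by
  intro s length _ hpre
  obtain ⟨hd, hlen⟩ := hpre
  unfold Spec_bcryptjs_encode_base64_string_py
  unfold bcryptjs_encode_base64_string_py bcryptjs_encode_base64_string_py_alt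
  rw [if_pos hd, if_pos hd]
  have hblen : ((List.replicate (length - ((s.toList.map (fun ch => (ch.toNat : Int) - 48)).length : Int)).toNat (0:Int)
      ++ s.toList.map (fun ch => (ch.toNat : Int) - 48)).length : Int)
      = max length ((s.toList.map (fun ch => (ch.toNat : Int) - 48)).length : Int) := by
    simp [List.length_append, List.length_replicate]
    omega
  have hguard : ¬(length ≤ 0 ∨ ((List.replicate (length - ((s.toList.map (fun ch => (ch.toNat : Int) - 48)).length : Int)).toNat (0:Int)
      ++ s.toList.map (fun ch => (ch.toNat : Int) - 48)).length : Int) < length) := by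
    rw [hblen]; omega
  rw [if_neg hguard, if_neg hguard]
  congr 1
  exact (pvEnc_eq _ length (pvBytes_byte s hd _) (by rw [hblen]; omega)
    length.toNat 0 le_rfl)
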